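-- pv_equiv track=rewrite | github.com/IAmProgrammist/formal_languages_and_automata_theory | libs/lab1/task1.py | get_available_grammars_left
-- ===== SOURCE A (Python) =====
-- def get_available_grammars_left(grammar_dict, chain):
--     available_grammars = []
--     min_index = len(chain)
--     for i in range(0, len(grammar_dict)):
--         grammar = grammar_dict[i]
--         if (index := chain.find(grammar[0])) != -1 and index < min_index:
--             available_grammars = [(i, grammar)]
--             min_index = index
--         elif index == min_index:
--             available_grammars.append((i, grammar))
--     return available_grammars
-- ===== SOURCE B (Python) =====
-- def get_available_grammars_left(grammar_dict, chain):
--     # build-table-then-filter: first-occurrence index per grammar, then min, then filter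
--     table = []
--     for i, grammar in enumerate(grammar_dict):
--         index = chain.find(grammar[0])
--         if index != -1:
--             table.append((i, grammar, index))
--     if not table:
--         return []
--     min_index = min(index for _, _, index in table)
--     return [(i, grammar) for i, grammar, index in table if index == min_index]
-- ===== Notes on version B (the rewrite author's own statement) =====
-- stated objective: simpler
-- what changed: Replaces A's interleaved argmin loop (which resets/extends the result while tracking a running minimum) with a three-step decomposition: build the table of found first-occurrence indices, take its minimum, then filter the ties in order.
import Mathlib
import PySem

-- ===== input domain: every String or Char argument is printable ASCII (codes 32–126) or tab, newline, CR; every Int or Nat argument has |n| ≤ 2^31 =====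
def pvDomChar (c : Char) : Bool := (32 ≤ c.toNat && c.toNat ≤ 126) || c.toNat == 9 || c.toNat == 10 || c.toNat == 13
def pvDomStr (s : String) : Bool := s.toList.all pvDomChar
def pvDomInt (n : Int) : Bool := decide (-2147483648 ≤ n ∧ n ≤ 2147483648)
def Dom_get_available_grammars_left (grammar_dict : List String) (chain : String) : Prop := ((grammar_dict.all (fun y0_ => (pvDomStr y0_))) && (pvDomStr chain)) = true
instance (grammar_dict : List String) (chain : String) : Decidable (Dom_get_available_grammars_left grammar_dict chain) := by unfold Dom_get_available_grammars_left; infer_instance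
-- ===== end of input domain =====

-- B replaces A's interleaved argmin loop with a build-table / min / filter decomposition (objective: simpler).

-- ===== PORT A =====
-- A's loop body: grammar = grammar_dict[i]; walrus find; reset / append / skip.
-- On an empty grammar string Python raises IndexError (pyGet? = none); Pre_ excludes that, the port keeps the state.
def pvStepA (chain : String) (st : List (Int × String) × Int) (p : Int × String) : List (Int × String) × Int :=
  match PySem.Str.pyGet? p.2 0 with
  | none => st
  | some c =>
    let index : Int := PySem.Chars.find chain.toList [c]
    if index ≠ -1 ∧ index < st.2 then ([(p.1, p.2)], index)
    else if index = st.2 then (st.1 ++ [(p.1, p.2)], st.2)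
    else st

def get_available_grammars_left (grammar_dict : List String) (chain : String) : List (Int × String) :=
  ((PySem.List.pyRange 0 (grammar_dict.length : Int) 1).foldl
    (fun st i =>
      match PySem.List.pyGet? grammar_dict i with
      | none => st  -- unreachable: i ranges over the indices of grammar_dict
      | some grammar => pvStepA chain st (i, grammar))
    ([], (chain.toList.length : Int))).1

-- ===== PORT B =====
-- B's table entry: (i, grammar, index) when chain.find(grammar[0]) != -1 (none also on empty grammar, excluded by Pre_).
def pvEntryB (chain : String) (p : Int × String) : Option (Int × String × Int) :=
  match PySem.Str.pyGet? p.2 0 with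
  | none => none
  | some c =>
    let index : Int := PySem.Chars.find chain.toList [c]
    if index ≠ -1 then some (p.1, p.2, index) else none

def get_available_grammars_left_alt (grammar_dict : List String) (chain : String) : List (Int × String) :=
  let table := (PySem.List.enumerate grammar_dict).filterMap (pvEntryB chain)
  match PySem.List.min? (table.map (fun q => q.2.2)) (fun x => x) with
  | none => []
  | some min_index => table.filterMap (fun q => if q.2.2 = min_index then some (q.1, q.2.1) else none)

-- ===== PRECONDITION & SPEC =====
-- Pre_ excludes grammar_dict containing an empty string: there Python A (and B) raise IndexError on grammar[0].
def Pre_get_available_grammars_left (grammar_dict : List String) (chain : String) : Prop :=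
  ∀ g ∈ grammar_dict, g.toList ≠ []

instance (grammar_dict : List String) (chain : String) : Decidable (Pre_get_available_grammars_left grammar_dict chain) := by unfold Pre_get_available_grammars_left; infer_instance

def pvWitness_get_available_grammars_left : List String × String := (["S", "aA", "b"], "caSb")

def Spec_get_available_grammars_left (grammar_dict : List String) (chain : String) (out : List (Int × String)) : Prop := out = get_available_grammars_left_alt grammar_dict chain
instance (grammar_dict : List String) (chain : String) (out : List (Int × String)) : Decidable (Spec_get_available_grammars_left grammar_dict chain out) := by unfold Spec_get_available_grammars_left; infer_instance

-- ===== CLAIM (what is proved, stated in full; the proofs are below) =====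
def Claim_equal_get_available_grammars_left : Prop := ∀ (grammar_dict : List String) (chain : String), Dom_get_available_grammars_left grammar_dict chain → Pre_get_available_grammars_left grammar_dict chain → Spec_get_available_grammars_left grammar_dict chain (get_available_grammars_left grammar_dict chain)

-- ===== LEMMAS AND PROOFS =====

-- proof-side abbreviations for B's three stages on an arbitrary enumerated list L
def pvTbl (chain : String) (L : List (Int × String)) : List (Int × String × Int) :=
  L.filterMap (pvEntryB chain)

def pvMin (chain : String) (L : List (Int × String)) : Int :=
  match PySem.List.min? ((pvTbl chain L).map (fun q => q.2.2)) (fun x => x) with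
  | none => (chain.toList.length : Int)
  | some m => m

def pvRes (chain : String) (L : List (Int × String)) : List (Int × String) :=
  match PySem.List.min? ((pvTbl chain L).map (fun q => q.2.2)) (fun x => x) with
  | none => []
  | some m => (pvTbl chain L).filterMap (fun q => if q.2.2 = m then some (q.1, q.2.1) else none)

theorem pvAlt_eq_pvRes (grammar_dict : List String) (chain : String) :
    get_available_grammars_left_alt grammar_dict chain = pvRes chain (PySem.List.enumerate grammar_dict) := rfl

-- a found single-character occurrence lies strictly inside the chain
theorem pvFind_lt_len (s : List Char) (c : Char) (h : PySem.Chars.find s [c] ≠ -1) :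
    0 ≤ PySem.Chars.find s [c] ∧ PySem.Chars.find s [c] < (s.length : Int) := by
  have hge : -1 ≤ PySem.Chars.find s [c] := PySem.Chars.neg_one_le_find s [c]
  have h0 : 0 ≤ PySem.Chars.find s [c] := by omega
  obtain ⟨hpre, -⟩ := PySem.Chars.find_spec h0
  have hlen := hpre.length_le
  simp [List.length_drop] at hlen
  constructor
  · exact h0
  · omega

-- min? with key id returns a when a is a member and a lower bound
theorem pvMin?_eq_some (xs : List Int) (a : Int) (ha : a ∈ xs) (hmin : ∀ x ∈ xs, a ≤ x) :
    PySem.List.min? xs (fun x => x) = some a := by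
  cases h : PySem.List.min? xs (fun x => x) with
  | none =>
      rw [PySem.List.min?_eq_none_iff] at h
      subst h; simp at ha
  | some m =>
      have h1 : m ∈ xs := PySem.List.min?_mem h
      have h2 : m ≤ a := PySem.List.min?_isMin h a ha
      have h3 : a ≤ m := hmin m h1
      have : m = a := le_antisymm h2 h3
      rw [this]

theorem pvEntryB_bounds (chain : String) (p : Int × String) (q : Int × String × Int)
    (h : pvEntryB chain p = some q) : 0 ≤ q.2.2 ∧ q.2.2 < (chain.toList.length : Int) := by
  unfold pvEntryB at h
  cases hc : PySem.Str.pyGet? p.2 0 with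
  | none => rw [hc] at h; exact absurd h (by simp)
  | some c =>
      rw [hc] at h
      simp only at h
      split at h
      · rename_i hne
        rw [Option.some_inj] at h
        rw [← h]
        exact pvFind_lt_len chain.toList c hne
      · exact absurd h (by simp)

theorem pvTbl_bounds (chain : String) (L : List (Int × String)) :
    ∀ x ∈ (pvTbl chain L).map (fun q => q.2.2), 0 ≤ x ∧ x < (chain.toList.length : Int) := by
  intro x hx
  rw [List.mem_map] at hx
  obtain ⟨q, hq, rfl⟩ := hx
  rw [pvTbl, List.mem_filterMap] at hq
  obtain ⟨p, -, hp⟩ := hq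
  exact pvEntryB_bounds chain p q hp

theorem pvMin_bounds (chain : String) (L : List (Int × String)) :
    0 ≤ pvMin chain L ∧ pvMin chain L ≤ (chain.toList.length : Int) := by
  cases h : PySem.List.min? ((pvTbl chain L).map (fun q => q.2.2)) (fun x => x) with
  | none => simp only [pvMin, h]; omega
  | some m =>
      have hm := pvTbl_bounds chain L m (PySem.List.min?_mem h)
      simp only [pvMin, h]
      omega

theorem pvMin_isMin (chain : String) (L : List (Int × String)) :
    ∀ x ∈ (pvTbl chain L).map (fun q => q.2.2), pvMin chain L ≤ x := by
  intro x hx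
  cases h : PySem.List.min? ((pvTbl chain L).map (fun q => q.2.2)) (fun x => x) with
  | none =>
      rw [PySem.List.min?_eq_none_iff] at h
      rw [h] at hx; simp at hx
  | some m =>
      simp only [pvMin, h]
      exact PySem.List.min?_isMin h x hx

-- if the table is nonempty, min? returns exactly pvMin
theorem pvMin_some (chain : String) (L : List (Int × String)) (h0 : pvTbl chain L ≠ []) :
    PySem.List.min? ((pvTbl chain L).map (fun q => q.2.2)) (fun x => x) = some (pvMin chain L) := by
  cases h : PySem.List.min? ((pvTbl chain L).map (fun q => q.2.2)) (fun x => x) with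
  | none =>
      rw [PySem.List.min?_eq_none_iff] at h
      simp only [List.map_eq_nil_iff] at h
      exact absurd h h0
  | some m => simp only [pvMin, h]

theorem pvTbl_append_singleton (chain : String) (L : List (Int × String)) (p : Int × String) :
    pvTbl chain (L ++ [p]) = pvTbl chain L ++ (pvEntryB chain p).toList := by
  cases hE : pvEntryB chain p <;> simp [pvTbl, List.filterMap_append, hE]

-- the loop invariant: A's fold over any enumerated list computes (B's result, B's running minimum)
theorem pvLoop_inv (chain : String) (L : List (Int × String)) :
    L.foldl (pvStepA chain) ([], (chain.toList.length : Int)) = (pvRes chain L, pvMin chain L) := by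
  induction L using List.reverseRecOn with
  | nil => simp [pvRes, pvMin, pvTbl, PySem.List.min?]
  | append_singleton L p ih =>
      rw [List.foldl_append, ih]
      simp only [List.foldl_cons, List.foldl_nil]
      have htbl := pvTbl_append_singleton chain L p
      have hbounds := pvMin_bounds chain L
      have hisMin := pvMin_isMin chain L
      cases hc : PySem.Str.pyGet? p.2 0 with
      | none =>
          have he : pvEntryB chain p = none := by unfold pvEntryB; rw [hc]
          have hst : pvStepA chain (pvRes chain L, pvMin chain L) p = (pvRes chain L, pvMin chain L) := by
            unfold pvStepA; rw [hc]
          rw [hst]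
          rw [he] at htbl
          simp only [Option.toList_none, List.append_nil] at htbl
          simp only [pvRes, pvMin, htbl]
      | some c =>
          by_cases hm1 : PySem.Chars.find chain.toList [c] = -1
          · have he : pvEntryB chain p = none := by
              unfold pvEntryB; rw [hc]
              simp only
              rw [if_neg (by simp [hm1])]
            have hst : pvStepA chain (pvRes chain L, pvMin chain L) p = (pvRes chain L, pvMin chain L) := by
              unfold pvStepA; rw [hc]
              simp only
              rw [if_neg (by simp [hm1]), if_neg (by rw [hm1]; omega)]
            rw [hst]
            rw [he] at htbl
            simp only [Option.toList_none, List.append_nil] at htbl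
            simp only [pvRes, pvMin, htbl]
          · have he : pvEntryB chain p = some (p.1, p.2, PySem.Chars.find chain.toList [c]) := by
              unfold pvEntryB; rw [hc]
              simp only
              rw [if_pos hm1]
            obtain ⟨hge0, hltlen⟩ := pvFind_lt_len chain.toList c hm1
            have hmap : (pvTbl chain (L ++ [p])).map (fun q => q.2.2)
                = (pvTbl chain L).map (fun q => q.2.2) ++ [PySem.Chars.find chain.toList [c]] := by
              rw [htbl, he]; simp
            rcases lt_trichotomy (PySem.Chars.find chain.toList [c]) (pvMin chain L) with hlt2 | heq2 | hgt2
            · -- strictly smaller: A resets; B's new minimum is the new index, only the new entry survives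
              have hst : pvStepA chain (pvRes chain L, pvMin chain L) p
                  = ([(p.1, p.2)], PySem.Chars.find chain.toList [c]) := by
                unfold pvStepA; rw [hc]
                simp only
                rw [if_pos ⟨hm1, hlt2⟩]
              have hmin' : PySem.List.min? ((pvTbl chain (L ++ [p])).map (fun q => q.2.2)) (fun x => x)
                  = some (PySem.Chars.find chain.toList [c]) := by
                rw [hmap]
                apply pvMin?_eq_some
                · simp
                · intro x hx
                  rcases List.mem_append.mp hx with hx | hx
                  · have := hisMin x hx; omega
                  · simp at hx; omega
              have hnil : (pvTbl chain L).filterMap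
                  (fun q => if q.2.2 = PySem.Chars.find chain.toList [c] then some (q.1, q.2.1) else none) = [] := by
                rw [List.filterMap_eq_nil_iff]
                intro q hq
                have : pvMin chain L ≤ q.2.2 := hisMin q.2.2 (List.mem_map.mpr ⟨q, hq, rfl⟩)
                rw [if_neg (by omega)]
              have hR : pvRes chain (L ++ [p]) = [(p.1, p.2)] := by
                unfold pvRes
                rw [hmin', htbl, he]
                simp only [Option.toList_some, List.filterMap_append, hnil]
                simp
              have hM : pvMin chain (L ++ [p]) = PySem.Chars.find chain.toList [c] := by
                unfold pvMin; rw [hmin']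
              rw [hst, hR, hM]
            · -- tie: A appends; the minimum is unchanged and the new entry passes the filter
              have htne : pvTbl chain L ≠ [] := by
                intro h0
                have : pvMin chain L = (chain.toList.length : Int) := by
                  simp only [pvMin, h0, List.map_nil]
                  rw [show PySem.List.min? ([] : List Int) (fun x => x) = none from
                    (PySem.List.min?_eq_none_iff [] _).mpr rfl]
                omega
              have hsome := pvMin_some chain L htne
              have hmem : pvMin chain L ∈ (pvTbl chain L).map (fun q => q.2.2) := PySem.List.min?_mem hsome
              have hmin' : PySem.List.min? ((pvTbl chain (L ++ [p])).map (fun q => q.2.2)) (fun x => x)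
                  = some (pvMin chain L) := by
                rw [hmap]
                apply pvMin?_eq_some
                · exact List.mem_append.mpr (Or.inl hmem)
                · intro x hx
                  rcases List.mem_append.mp hx with hx | hx
                  · exact hisMin x hx
                  · simp at hx; omega
              have hst : pvStepA chain (pvRes chain L, pvMin chain L) p
                  = (pvRes chain L ++ [(p.1, p.2)], pvMin chain L) := by
                unfold pvStepA; rw [hc]
                simp only
                rw [if_neg (by omega), if_pos heq2]
              have hR : pvRes chain (L ++ [p]) = pvRes chain L ++ [(p.1, p.2)] := by
                unfold pvRes
                rw [hmin', htbl, he, hsome]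
                simp only [Option.toList_some, List.filterMap_append]
                simp [heq2]
              have hM : pvMin chain (L ++ [p]) = pvMin chain L := by
                unfold pvMin; rw [hmin', hsome]
              rw [hst, hR, hM]
            · -- strictly larger: A skips; the minimum is unchanged and the new entry is filtered out
              have htne : pvTbl chain L ≠ [] := by
                intro h0
                have : pvMin chain L = (chain.toList.length : Int) := by
                  simp only [pvMin, h0, List.map_nil]
                  rw [show PySem.List.min? ([] : List Int) (fun x => x) = none from
                    (PySem.List.min?_eq_none_iff [] _).mpr rfl]
                omega
              have hsome := pvMin_some chain L htne
              have hmem : pvMin chain L ∈ (pvTbl chain L).map (fun q => q.2.2) := PySem.List.min?_mem hsome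
              have hmin' : PySem.List.min? ((pvTbl chain (L ++ [p])).map (fun q => q.2.2)) (fun x => x)
                  = some (pvMin chain L) := by
                rw [hmap]
                apply pvMin?_eq_some
                · exact List.mem_append.mpr (Or.inl hmem)
                · intro x hx
                  rcases List.mem_append.mp hx with hx | hx
                  · exact hisMin x hx
                  · simp at hx; omega
              have hst : pvStepA chain (pvRes chain L, pvMin chain L) p = (pvRes chain L, pvMin chain L) := by
                unfold pvStepA; rw [hc]
                simp only
                rw [if_neg (by omega), if_neg (by omega)]
              have hR : pvRes chain (L ++ [p]) = pvRes chain L := by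
                unfold pvRes
                rw [hmin', htbl, he, hsome]
                simp only [Option.toList_some, List.filterMap_append]
                simp [show ¬ (PySem.Chars.find chain.toList [c] = pvMin chain L) from by omega]
              have hM : pvMin chain (L ++ [p]) = pvMin chain L := by
                unfold pvMin; rw [hmin', hsome]
              rw [hst, hR, hM]

-- A's index loop over range(len(grammar_dict)) is the fold of pvStepA over the enumeration
theorem pvBridgeA (grammar_dict : List String) (chain : String) (s0 : List (Int × String) × Int) :
    (PySem.List.pyRange 0 (grammar_dict.length : Int) 1).foldl
      (fun st i =>
        match PySem.List.pyGet? grammar_dict i with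
        | none => st
        | some grammar => pvStepA chain st (i, grammar))
      s0
    = (PySem.List.enumerate grammar_dict).foldl (pvStepA chain) s0 := by
  rw [PySem.List.enumerate_eq_map_pyRange grammar_dict "", List.foldl_map]
  have hlen : PySem.List.len grammar_dict = (grammar_dict.length : Int) := by
    simp [PySem.List.len_eq]
  rw [hlen]
  apply PySem.List.foldl_congr_mem
  intro acc i hi
  rw [PySem.List.mem_pyRange_one] at hi
  have h1 : i.toNat < grammar_dict.length := by omega
  rw [PySem.List.pyGet?_of_nonneg grammar_dict hi.1,
      PySem.List.pyGetD_eq_getElem grammar_dict "" hi.1 hi.2,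
      List.getElem?_eq_getElem h1]

-- ===== VERDICT (by name: the statement is the Claim_ definition above) =====
theorem get_available_grammars_left_spec : Claim_equal_get_available_grammars_left := by
  intro grammar_dict chain _ _
  unfold Spec_get_available_grammars_left
  unfold get_available_grammars_left
  rw [pvBridgeA, pvLoop_inv, pvAlt_eq_pvRes]
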